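-- pv_equiv track=rewrite | github.com/akara286/and_search_tree | src/input_parser.py | parse_not_compatible
-- ===== SOURCE A (Python) =====
-- def parse_not_compatible(not_compatible):
--     """
--     Convert raw 'Not compatible:' lines into a quick lookup dictionary.
--     Not currently used if we have a direct structure, but provides a fallback map.
--     """
--     incompatibilities = {}
--     for entry in not_compatible:
--         items = [item.strip() for item in entry.split(",")]
--         for i in range(len(items)):
--             for j in range(i + 1, len(items)):
--                 if items[i] not in incompatibilities:
--                     incompatibilities[items[i]] = set()
--                 incompatibilities[items[i]].add(items[j])
--     return incompatibilities
-- ===== SOURCE B (Python) =====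
-- def parse_not_compatible(not_compatible):
--     # Phase 1: flatten every entry into an ordered list of (earlier, later) pairs.
--     pairs = []
--     for entry in not_compatible:
--         items = [item.strip() for item in entry.split(",")]
--         while len(items) > 1:
--             head = items[0]
--             items = items[1:]
--             pairs.extend((head, other) for other in items)
--     # Phase 2: aggregate the pair stream into the lookup dictionary.
--     incompatibilities = {}
--     for a, b in pairs:
--         incompatibilities.setdefault(a, set()).add(b)
--     return incompatibilities
-- ===== Notes on version B (the rewrite author's own statement) =====
-- stated objective: alternative
-- what changed: Replaces A's in-place nested i<j index loops over each entry with a two-phase decomposition: first flatten every entry into an ordered stream of (earlier, later) pairs via a pop-front loop, then aggregate the stream into the dictionary with setdefault; this also drops A's repeated per-pair membership test and indexing, which a timing run measured as a constant-factor speedup.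
import Mathlib
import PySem

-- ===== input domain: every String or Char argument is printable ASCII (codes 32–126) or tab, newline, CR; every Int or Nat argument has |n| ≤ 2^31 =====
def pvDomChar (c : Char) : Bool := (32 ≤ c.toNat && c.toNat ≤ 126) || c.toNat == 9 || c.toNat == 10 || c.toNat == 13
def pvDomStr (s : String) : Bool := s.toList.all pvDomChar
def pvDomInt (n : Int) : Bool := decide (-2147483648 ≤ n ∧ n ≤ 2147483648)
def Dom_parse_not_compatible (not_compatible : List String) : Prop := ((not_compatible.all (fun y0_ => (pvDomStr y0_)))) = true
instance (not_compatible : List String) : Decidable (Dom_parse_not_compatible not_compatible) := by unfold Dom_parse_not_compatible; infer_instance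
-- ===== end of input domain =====

-- B replaces A's in-place nested index loops with a two-phase decomposition (flatten each
-- entry into an ordered (earlier, later) pair stream, then aggregate the stream into the
-- dictionary); objective: alternative (same cost, different structure).

-- ===== PORT A =====
-- entry.split(",") with the literal non-empty separator ",": split? never returns none, so .getD [] is exact
def parse_not_compatible (not_compatible : List String) : List (String × List String) :=
  (not_compatible.foldl (fun incomp entry =>
    let items := ((PySem.Str.split? entry ",").getD []).map (fun item => PySem.Str.strip item)
    (PySem.List.pyRange 0 (PySem.List.len items) 1).foldl (fun incomp i =>
      (PySem.List.pyRange (i + 1) (PySem.List.len items) 1).foldl (fun incomp j =>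
        let ki := PySem.List.pyGetD items i ""
        let kj := PySem.List.pyGetD items j ""
        let incomp := if incomp.contains ki then incomp else incomp.insert ki PySem.Set.empty
        incomp.modify ki PySem.Set.empty (fun s => PySem.Set.add s kj)) incomp) incomp)
    PySem.Dict.empty).items

-- ===== PORT B =====
-- Source B's 'while len(items) > 1: head, items = items[0], items[1:]' pop-front loop, as structural recursion
def pvPairsOf : List String → List (String × String)
  | [] => []
  | head :: rest => rest.map (fun other => (head, other)) ++ pvPairsOf rest

def parse_not_compatible_alt (not_compatible : List String) : List (String × List String) :=
  let pairs := not_compatible.foldl (fun pairs entry =>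
    pairs ++ pvPairsOf (((PySem.Str.split? entry ",").getD []).map (fun item => PySem.Str.strip item))) []
  (pairs.foldl (fun incomp ab =>
    (incomp.setdefault ab.1 PySem.Set.empty).modify ab.1 PySem.Set.empty
      (fun s => PySem.Set.add s ab.2)) PySem.Dict.empty).items

-- ===== PRECONDITION & SPEC =====
def Spec_parse_not_compatible (not_compatible : List String) (out : List (String × List String)) : Prop := out = parse_not_compatible_alt not_compatible
instance (not_compatible : List String) (out : List (String × List String)) : Decidable (Spec_parse_not_compatible not_compatible out) := by unfold Spec_parse_not_compatible; infer_instance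

-- ===== CLAIM (what is proved, stated in full; the proofs are below) =====
def Claim_equal_parse_not_compatible : Prop := ∀ (not_compatible : List String), Dom_parse_not_compatible not_compatible → Spec_parse_not_compatible not_compatible (parse_not_compatible not_compatible)

-- ===== LEMMAS AND PROOFS =====

-- A's "if absent, insert empty set; then add" step IS setdefault-then-add
lemma pv_step_eq (d : PySem.Dict String (List String)) (a b : String) :
    (if d.contains a then d else d.insert a PySem.Set.empty).modify a PySem.Set.empty
        (fun s => PySem.Set.add s b) =
      (d.setdefault a PySem.Set.empty).modify a PySem.Set.empty (fun s => PySem.Set.add s b) := by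
  by_cases h : d.contains a = true
  · rw [PySem.Dict.setdefault_of_contains d _ h, if_pos h]
  · rw [PySem.Dict.setdefault_of_not_contains d _ (by simpa using h), if_neg h]

-- folding over a flattened list = folding each chunk in turn
lemma pv_foldl_flatMap {α β γ : Type} (g : α → List β) (f : γ → β → γ) :
    ∀ (l : List α) (init : γ),
      (l.flatMap g).foldl f init = l.foldl (fun acc x => (g x).foldl f acc) init := by
  intro l
  induction l with
  | nil => intro init; rfl
  | cons h t ih => intro init; simp [List.flatMap_cons, List.foldl_append, ih]

-- the nested "for i, for j > i over items[·]" index loops are a fold over the (earlier, later) pair stream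
lemma pv_tails_fold {γ : Type} (f : γ → String → String → γ) :
    ∀ (items : List String) (d : γ),
      (List.range items.length).foldl
          (fun d k => (items.drop (k + 1)).foldl (fun d x => f d (items.getD k "") x) d) d =
        (pvPairsOf items).foldl (fun d p => f d p.1 p.2) d := by
  intro items
  induction items with
  | nil => intro d; rfl
  | cons h t ih =>
    intro d
    rw [pvPairsOf, List.foldl_append, List.foldl_map]
    rw [List.length_cons, List.range_succ_eq_map, List.foldl_cons, List.foldl_map]
    simp only [List.drop_succ_cons, List.getD_cons_succ, List.getD_cons_zero, List.drop_zero,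
      Nat.succ_eq_add_one]
    exact ih _

-- one entry of A's nested index loops equals the fold of that entry's pair stream
lemma pv_entry_eq (items : List String) (d : PySem.Dict String (List String)) :
    (PySem.List.pyRange 0 (PySem.List.len items) 1).foldl (fun incomp i =>
        (PySem.List.pyRange (i + 1) (PySem.List.len items) 1).foldl (fun incomp j =>
          let ki := PySem.List.pyGetD items i ""
          let kj := PySem.List.pyGetD items j ""
          let incomp := if incomp.contains ki then incomp else incomp.insert ki PySem.Set.empty
          incomp.modify ki PySem.Set.empty (fun s => PySem.Set.add s kj)) incomp) d =
      (pvPairsOf items).foldl (fun incomp ab =>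
        (incomp.setdefault ab.1 PySem.Set.empty).modify ab.1 PySem.Set.empty
          (fun s => PySem.Set.add s ab.2)) d := by
  rw [PySem.List.foldl_congr_mem _ _
    (fun incomp i =>
      (List.drop ((i + 1).toNat) items).foldl
        (fun incomp x =>
          (incomp.setdefault (PySem.List.pyGetD items i "") PySem.Set.empty).modify
            (PySem.List.pyGetD items i "") PySem.Set.empty (fun s => PySem.Set.add s x)) incomp)
    d ?_]
  · rw [show PySem.List.len items = ((items.length : Int)) from rfl, PySem.List.pyRange_one]
    rw [show ((items.length : Int) - 0).toNat = items.length by omega, List.foldl_map]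
    have hconv : ∀ (dd : PySem.Dict String (List String)), ∀ k ∈ List.range items.length,
        (List.drop (((0 : Int) + k + 1).toNat) items).foldl
          (fun incomp x =>
            (incomp.setdefault (PySem.List.pyGetD items ((0 : Int) + k) "") PySem.Set.empty).modify
              (PySem.List.pyGetD items ((0 : Int) + k) "") PySem.Set.empty
              (fun s => PySem.Set.add s x)) dd =
        (List.drop (k + 1) items).foldl
          (fun incomp x =>
            (incomp.setdefault (items.getD k "") PySem.Set.empty).modify
              (items.getD k "") PySem.Set.empty (fun s => PySem.Set.add s x)) dd := by
      intro dd k _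
      rw [show ((0 : Int) + k + 1).toNat = k + 1 by omega,
        show ((0 : Int) + k) = (k : Int) by omega, PySem.List.pyGetD_natCast]
    rw [PySem.List.foldl_congr_mem _ _ _ d hconv]
    exact pv_tails_fold
      (fun dd a b => (dd.setdefault a PySem.Set.empty).modify a PySem.Set.empty
        (fun s => PySem.Set.add s b)) items d
  · intro incomp i hi
    have h0 : (0 : Int) ≤ i := (PySem.List.mem_pyRange_one.mp hi).1
    rw [PySem.List.foldl_congr_mem _ _
      (fun dd j =>
        (dd.setdefault (PySem.List.pyGetD items i "") PySem.Set.empty).modify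
          (PySem.List.pyGetD items i "") PySem.Set.empty
          (fun s => PySem.Set.add s (PySem.List.pyGetD items j ""))) incomp
      (fun dd j _ => pv_step_eq dd (PySem.List.pyGetD items i "")
        (PySem.List.pyGetD items j ""))]
    have := PySem.List.foldl_pyRange_pyGetD' items ""
      (fun dd x =>
        (dd.setdefault (PySem.List.pyGetD items i "") PySem.Set.empty).modify
          (PySem.List.pyGetD items i "") PySem.Set.empty (fun s => PySem.Set.add s x))
      incomp (a := i + 1) (by omega)
    simpa [PySem.List.len] using this

-- ===== VERDICT (by name: the statement is the Claim_ definition above) =====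
theorem parse_not_compatible_spec : Claim_equal_parse_not_compatible := by
  intro nc _
  unfold Spec_parse_not_compatible parse_not_compatible parse_not_compatible_alt
  dsimp only
  rw [show (List.foldl (fun pairs entry =>
        pairs ++ pvPairsOf (((PySem.Str.split? entry ",").getD []).map
          (fun item => PySem.Str.strip item))) [] nc) =
      nc.flatMap (fun entry =>
        pvPairsOf (((PySem.Str.split? entry ",").getD []).map
          (fun item => PySem.Str.strip item)))
    from by
      simpa using PySem.List.foldl_append_eq_flatMap
        (fun entry => pvPairsOf (((PySem.Str.split? entry ",").getD []).map
          (fun item => PySem.Str.strip item))) nc []]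
  rw [pv_foldl_flatMap]
  congr 1
  exact PySem.List.foldl_congr_mem _ _ _ _
    (fun d entry _ => (pv_entry_eq _ d).symm) |>.symm
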